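-- pv_equiv track=rewrite | github.com/jk-jung/problem-solving | codewars/5kyu/5_Simple Fun #89: Boxes Packing.py | boxes_packing
-- ===== SOURCE A (Python) =====
-- def boxes_packing(a, b, c):
--     l = sorted(zip(a, b, c), key=lambda x: -x[0] * x[1] * x[2])
--     l = [sorted(list(x)) for x in l]
--     for i in range(1, len(l)):
--         for j in range(3):
--             if l[i - 1][j] <= l[i][j]:
--                 return False
--     return True
-- ===== SOURCE B (Python) =====
-- def boxes_packing(a, b, c):
--     boxes = sorted((sorted(d) for d in zip(a, b, c)),
--                    key=lambda d: d[0] * d[1] * d[2], reverse=True)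
--     return all(all(p > q for p, q in zip(big, small))
--                for i, big in enumerate(boxes)
--                for small in boxes[i + 1:])
-- ===== Notes on version B (the rewrite author's own statement) =====
-- stated objective: alternative
-- what changed: Instead of A's index-driven scan of consecutive pairs with early return, B sorts the dimension triples first, orders the boxes largest-volume-first with reverse=True, and checks with a comprehension that every box fits strictly inside every earlier box (all pairs, not just adjacent ones); strict coordinatewise domination is transitive, so the two checks agree.
import Mathlib
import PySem

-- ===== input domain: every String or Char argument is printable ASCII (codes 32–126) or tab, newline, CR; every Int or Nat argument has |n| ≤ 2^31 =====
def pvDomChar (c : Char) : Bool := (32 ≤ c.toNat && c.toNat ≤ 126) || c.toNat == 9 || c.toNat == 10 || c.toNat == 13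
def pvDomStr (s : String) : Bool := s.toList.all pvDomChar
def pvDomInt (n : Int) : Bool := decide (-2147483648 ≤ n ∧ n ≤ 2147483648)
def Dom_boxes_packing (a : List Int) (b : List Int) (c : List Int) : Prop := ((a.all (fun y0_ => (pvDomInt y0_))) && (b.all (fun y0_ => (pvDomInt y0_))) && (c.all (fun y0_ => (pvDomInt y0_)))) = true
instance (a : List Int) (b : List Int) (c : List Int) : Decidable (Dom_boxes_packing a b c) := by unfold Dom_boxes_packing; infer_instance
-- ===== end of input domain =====

-- B sorts each box's dimensions first, orders the boxes largest-volume-first, and checks that every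
-- box fits strictly inside every earlier box (all pairs, via transitivity), instead of A's
-- index-driven scan of consecutive pairs (objective: alternative).

-- ===== PORT A =====
-- key=lambda x: -x[0] * x[1] * x[2]
def pvVolKey (x : Int × Int × Int) : Int := (-x.1) * x.2.1 * x.2.2
-- sorted(list(x)) for a 3-tuple x
def pvSortDims (x : Int × Int × Int) : List Int := PySem.List.sorted [x.1, x.2.1, x.2.2] (fun v => v)
-- body of the double loop: 'if l[i - 1][j] <= l[i][j]: return False' (continue ⇔ not ≤)
def pvACheck (l : List (List Int)) (i j : Int) : Bool :=
  match PySem.List.pyGet? l (i - 1), PySem.List.pyGet? l i with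
  | some p, some q =>
    match PySem.List.pyGet? p j, PySem.List.pyGet? q j with
    | some u, some v => !decide (u ≤ v)
    | _, _ => false
  | _, _ => false

def boxes_packing (a : List Int) (b : List Int) (c : List Int) : Bool :=
  let l0 := PySem.List.sorted (a.zip (b.zip c)) pvVolKey
  let l := l0.map pvSortDims
  (PySem.List.pyRange 1 l.length).all fun i =>
    (PySem.List.pyRange 0 3).all fun j => pvACheck l i j

-- ===== PORT B =====
-- lambda d: d[0] * d[1] * d[2]  (d is always a sorted 3-element dimension list, so the catch-all is unreachable)
def pvKeyB (d : List Int) : Int :=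
  match d with
  | [u, v, w] => u * v * w
  | _ => 0

-- all(p > q for p, q in zip(big, small))
def pvFits (big small : List Int) : Bool :=
  (big.zip small).all fun p => decide (p.1 > p.2)

def boxes_packing_alt (a : List Int) (b : List Int) (c : List Int) : Bool :=
  let boxes := PySem.List.sorted
    ((a.zip (b.zip c)).map (fun x => PySem.List.sorted [x.1, x.2.1, x.2.2] (fun v => v)))
    pvKeyB true
  (PySem.List.enumerate boxes).all fun ib =>
    (PySem.List.slice boxes (some (ib.1 + 1)) none).all fun small => pvFits ib.2 small

-- ===== PRECONDITION & SPEC =====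
def Spec_boxes_packing (a : List Int) (b : List Int) (c : List Int) (out : Bool) : Prop := out = boxes_packing_alt a b c
instance (a : List Int) (b : List Int) (c : List Int) (out : Bool) : Decidable (Spec_boxes_packing a b c out) := by unfold Spec_boxes_packing; infer_instance

-- ===== CLAIM (what is proved, stated in full; the proofs are below) =====
def Claim_equal_boxes_packing : Prop := ∀ (a : List Int) (b : List Int) (c : List Int), Dom_boxes_packing a b c → Spec_boxes_packing a b c (boxes_packing a b c)

-- ===== LEMMAS AND PROOFS =====

-- volume of a box triple
def pvVol (x : Int × Int × Int) : Int := x.1 * x.2.1 * x.2.2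

-- sorted(x,y,z) as a triple, and strict coordinatewise domination of sorted triples
def pvTriple (x : Int × Int × Int) : Int × Int × Int :=
  match PySem.List.sorted [x.1, x.2.1, x.2.2] (fun v => v) with
  | [u, v, w] => (u, v, w)
  | _ => (0, 0, 0)

def pvNests (t s : Int × Int × Int) : Bool :=
  decide (t.1 > s.1) && decide (t.2.1 > s.2.1) && decide (t.2.2 > s.2.2)

def pvR (t s : Int × Int × Int) : Prop := pvNests (pvTriple t) (pvTriple s) = true

theorem pvR_trans {a b c : Int × Int × Int} (h1 : pvR a b) (h2 : pvR b c) : pvR a c := by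
  unfold pvR at *; simp [pvNests] at h1 h2 ⊢; omega

-- pvSortDims returns the components of pvTriple
theorem pvSortDims_eq (x : Int × Int × Int) :
    pvSortDims x = [(pvTriple x).1, (pvTriple x).2.1, (pvTriple x).2.2] := by
  unfold pvSortDims pvTriple
  have hlen := PySem.List.length_sorted [x.1, x.2.1, x.2.2] (fun v => v) false
  match hs : PySem.List.sorted [x.1, x.2.1, x.2.2] (fun v => v) false with
  | [u, v, w] => simp
  | [] | [_] | [_, _] | _ :: _ :: _ :: _ :: _ => rw [hs] at hlen; simp at hlen

-- the product of the sorted dimension list is the volume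
theorem pvKeyB_sortDims (x : Int × Int × Int) : pvKeyB (pvSortDims x) = pvVol x := by
  have hperm := PySem.List.sorted_perm [x.1, x.2.1, x.2.2] (fun v => v) false
  have hprod := hperm.prod_eq
  have hd := pvSortDims_eq x
  unfold pvSortDims at hd
  rw [hd] at hprod
  simp [List.prod] at hprod
  rw [pvSortDims_eq]
  simp [pvKeyB, pvVol]
  linarith [hprod]

-- pvFits on sorted dimension lists is pvR
theorem pvFits_eq (x y : Int × Int × Int) :
    pvFits (pvSortDims x) (pvSortDims y) = true ↔ pvR x y := by
  rw [pvSortDims_eq x, pvSortDims_eq y]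
  simp [pvFits, pvR, pvNests, List.zip]
  omega

-- insertBy commutes with map when the comparator factors through the map
theorem pvInsertBy_map {α β : Type} (f : α → β) (q : α → α → Bool) (p : β → β → Bool)
    (hq : ∀ a b, p (f a) (f b) = q a b) (x : α) (l : List α) :
    PySem.List.insertBy p (f x) (l.map f) = (PySem.List.insertBy q x l).map f := by
  induction l with
  | nil => simp [PySem.List.insertBy]
  | cons y t ih =>
    simp only [List.map_cons, PySem.List.insertBy, hq]
    by_cases h : q x y = true
    · simp [h]
    · simp [h, ih]

-- sorting the mapped list with a key that factors through the map is mapping the sorted list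
theorem pvSorted_map (xs : List (Int × Int × Int)) :
    PySem.List.sorted (xs.map pvSortDims) pvKeyB true
      = (PySem.List.sorted xs pvVolKey false).map pvSortDims := by
  rw [PySem.List.sorted_rev_eq_foldl_insertBy, PySem.List.sorted_eq_foldl_insertBy]
  have hq : ∀ a b : Int × Int × Int,
      (fun u v => decide (pvKeyB v < pvKeyB u)) (pvSortDims a) (pvSortDims b)
        = (fun u v => decide (pvVolKey u < pvVolKey v)) a b := by
    intro a b
    simp only [pvKeyB_sortDims]
    apply decide_eq_decide.mpr
    unfold pvVol pvVolKey
    constructor <;> intro h <;> nlinarith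
  induction xs using List.reverseRecOn with
  | nil => simp
  | append_singleton t x ih =>
    simp only [List.map_append, List.map_cons, List.map_nil, List.foldl_append, List.foldl_cons,
      List.foldl_nil, ih]
    exact pvInsertBy_map pvSortDims
      (fun u v => decide (pvVolKey u < pvVolKey v))
      (fun u v => decide (pvKeyB v < pvKeyB u)) hq x _

-- the j-loop over a pair of sorted triples computes pvR
theorem pvInner_eq (x y : Int × Int × Int) :
    (((PySem.List.pyRange 0 3).all fun j =>
        match PySem.List.pyGet? (pvSortDims x) j, PySem.List.pyGet? (pvSortDims y) j with
        | some u, some v => !decide (u ≤ v)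
        | _, _ => false) = true) ↔ pvR x y := by
  have hr : PySem.List.pyRange 0 3 = [0, 1, 2] := by decide
  rw [hr, pvSortDims_eq x, pvSortDims_eq y]
  simp [PySem.List.pyGet?, PySem.List.pyIdx?, pvR, pvNests]
  omega

-- adjacency of a transitive relation along a list is Pairwise
theorem pvAdj_iff_pairwise {R : (Int × Int × Int) → (Int × Int × Int) → Prop}
    (htrans : ∀ {a b c}, R a b → R b c → R a c) (L : List (Int × Int × Int)) :
    (∀ k (h : k + 1 < L.length), R L[k] L[k + 1]) ↔ List.Pairwise R L := by
  constructor
  · intro hadj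
    rw [List.pairwise_iff_getElem]
    intro i j hi hj hij
    have key : ∀ d i (h : i + d + 1 < L.length),
        R (L[i]'(by omega)) (L[i + d + 1]'h) := by
      intro d
      induction d with
      | zero => intro i h; exact hadj i h
      | succ d ih =>
        intro i h
        have h2 := ih i (by omega)
        have h3 := hadj (i + d + 1) (by omega)
        have h4 := htrans h2 h3
        convert h4 using 2
    have := key (j - i - 1) i (by omega)
    convert this using 2
    omega
  · intro hp k h
    rw [List.pairwise_iff_getElem] at hp
    exact hp k (k + 1) (by omega) h (by omega)

-- A's index loop over an arbitrary list of boxes is the adjacency condition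
theorem pvAloop_iff (L : List (Int × Int × Int)) :
    (((PySem.List.pyRange 1 ((L.map pvSortDims).length : Int)).all fun i =>
        (PySem.List.pyRange 0 3).all fun j => pvACheck (L.map pvSortDims) i j) = true) ↔
      ∀ k (h : k + 1 < L.length), pvR L[k] L[k + 1] := by
  have elem : ∀ (k : Nat) (hk : k < L.length),
      (L.map pvSortDims)[k]? = some (pvSortDims (L[k]'hk)) := by
    intro k hk
    rw [List.getElem?_map, List.getElem?_eq_getElem (by omega)]
    rfl
  simp only [List.all_eq_true, List.length_map]
  constructor
  · intro h k hk
    have hmem : ((k : Int) + 1) ∈ PySem.List.pyRange 1 (L.length : Int) := by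
      rw [PySem.List.mem_pyRange_one]; omega
    have h2 := h _ hmem
    rw [← pvInner_eq]
    simp only [List.all_eq_true] at h2 ⊢
    intro j hj
    have h3 := h2 j hj
    unfold pvACheck at h3
    rw [show ((k : Int) + 1 - 1) = ((k : Nat) : Int) by omega,
        PySem.List.pyGet?_natCast, elem k (by omega)] at h3
    rw [show ((k : Int) + 1) = (((k + 1 : Nat)) : Int) by omega,
        PySem.List.pyGet?_natCast, elem (k + 1) (by omega)] at h3
    exact h3
  · intro h i hi
    rw [PySem.List.mem_pyRange_one] at hi
    obtain ⟨hi1, hi2⟩ := hi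
    obtain ⟨k, hik, hklt⟩ : ∃ k : Nat, i = (k : Int) + 1 ∧ k + 1 < L.length :=
      ⟨(i - 1).toNat, by omega, by omega⟩
    subst hik
    have h2 := h k hklt
    rw [← pvInner_eq] at h2
    simp only [List.all_eq_true] at h2 ⊢
    intro j hj
    have h3 := h2 j hj
    unfold pvACheck
    rw [show ((k : Int) + 1 - 1) = ((k : Nat) : Int) by omega,
        PySem.List.pyGet?_natCast, elem k (by omega)]
    rw [show ((k : Int) + 1) = (((k + 1 : Nat)) : Int) by omega,
        PySem.List.pyGet?_natCast, elem (k + 1) (by omega)]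
    exact h3

-- B's enumerate/slice double comprehension over an arbitrary list is Pairwise
theorem pvBloop_iff {α : Type} (P : α → α → Bool) (L : List α) :
    (((PySem.List.enumerate L).all fun ib =>
        (PySem.List.slice L (some (ib.1 + 1)) none).all fun small => P ib.2 small) = true) ↔
      List.Pairwise (fun x y => P x y = true) L := by
  rw [List.pairwise_iff_getElem]
  simp only [List.all_eq_true]
  constructor
  · intro h i j hi hj hij
    have hm : ((i : Int), L[i]) ∈ PySem.List.enumerate L := by
      rw [PySem.List.mem_enumerate_iff]
      exact ⟨i, hi, by simp⟩
    have h2 := h _ hm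
    simp only at h2
    rw [show ((i : Int) + 1) = (((i + 1 : Nat)) : Int) by omega,
        PySem.List.slice_from_natCast] at h2
    apply h2
    rw [List.mem_drop_iff_getElem]
    exact ⟨j - (i + 1), by omega, by congr 1; omega⟩
  · intro h ib hib small hsm
    rw [PySem.List.mem_enumerate_iff] at hib
    obtain ⟨k, hk, rfl⟩ := hib
    simp only at hsm ⊢
    rw [show ((0 : Int) + (k : Int) + 1) = (((k + 1 : Nat)) : Int) by omega,
        PySem.List.slice_from_natCast] at hsm
    rw [List.mem_drop_iff_getElem] at hsm
    obtain ⟨d, hd, rfl⟩ := hsm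
    exact h k (k + 1 + d) hk (by omega) (by omega)

-- ===== VERDICT (by name: the statement is the Claim_ definition above) =====
theorem boxes_packing_spec : Claim_equal_boxes_packing := by
  intro a b c _
  unfold Spec_boxes_packing
  rw [← Bool.coe_iff_coe]
  show ((PySem.List.pyRange 1
          ((((PySem.List.sorted (a.zip (b.zip c)) pvVolKey).map pvSortDims).length : Int))).all fun i =>
          (PySem.List.pyRange 0 3).all fun j =>
            pvACheck ((PySem.List.sorted (a.zip (b.zip c)) pvVolKey).map pvSortDims) i j) = true
        ↔ ((PySem.List.enumerate
              (PySem.List.sorted ((a.zip (b.zip c)).map pvSortDims) pvKeyB true)).all fun ib =>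
            (PySem.List.slice
              (PySem.List.sorted ((a.zip (b.zip c)).map pvSortDims) pvKeyB true)
              (some (ib.1 + 1)) none).all fun small => pvFits ib.2 small) = true
  rw [pvSorted_map, pvAloop_iff, pvBloop_iff, List.pairwise_map]
  exact (pvAdj_iff_pairwise (R := pvR) (fun h1 h2 => pvR_trans h1 h2)
      (PySem.List.sorted (a.zip (b.zip c)) pvVolKey)).trans
    ⟨fun h => h.imp fun hx => (pvFits_eq _ _).mpr hx,
     fun h => h.imp fun hx => (pvFits_eq _ _).mp hx⟩
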